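-- pv_equiv track=rewrite | github.com/roctbb/ai-game-engine | games/snake/engine.py | _non_dead_end_cells
-- ===== SOURCE A (Python) =====
-- _WIDTH = 12
--
-- _HEIGHT = 12
--
-- _DELTAS = {"up": (0, -1), "down": (0, 1), "left": (-1, 0), "right": (1, 0)}
--
-- def _non_dead_end_cells(blocked: set[tuple[int, int]]) -> set[tuple[int, int]]:
--     open_cells = {
--         (x, y)
--         for y in range(1, _HEIGHT - 1)
--         for x in range(1, _WIDTH - 1)
--         if (x, y) not in blocked
--     }
--     degrees = {
--         cell: sum(
--             (cell[0] + dx, cell[1] + dy) in open_cells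
--             for dx, dy in _DELTAS.values()
--         )
--         for cell in open_cells
--     }
--     queue = [cell for cell, degree in degrees.items() if degree <= 1]
--     removed: set[tuple[int, int]] = set()
--     head = 0
--     while head < len(queue):
--         cell = queue[head]
--         head += 1
--         if cell in removed:
--             continue
--         removed.add(cell)
--         for dx, dy in _DELTAS.values():
--             neighbor = (cell[0] + dx, cell[1] + dy)
--             if neighbor not in degrees or neighbor in removed:
--                 continue
--             degrees[neighbor] -= 1
--             if degrees[neighbor] <= 1:
--                 queue.append(neighbor)
--     return open_cells - removed
-- ===== SOURCE B (Python) =====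
-- _WIDTH = 12
--
-- _HEIGHT = 12
--
-- _DELTAS = {"up": (0, -1), "down": (0, 1), "left": (-1, 0), "right": (1, 0)}
--
-- def _non_dead_end_cells(blocked: set[tuple[int, int]]) -> set[tuple[int, int]]:
--     open_cells = {
--         (x, y)
--         for y in range(1, _HEIGHT - 1)
--         for x in range(1, _WIDTH - 1)
--         if (x, y) not in blocked
--     }
--     remaining = set(open_cells)
--     while True:
--         to_remove = {
--             cell
--             for cell in remaining
--             if sum(
--                 (cell[0] + dx, cell[1] + dy) in remaining
--                 for dx, dy in _DELTAS.values()
--             ) <= 1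
--         }
--         if not to_remove:
--             return remaining
--         remaining -= to_remove
-- ===== Notes on version B (the rewrite author's own statement) =====
-- stated objective: alternative
-- what changed: A's BFS-style queue with an incrementally maintained degree dictionary is replaced by repeated full rescans of the remaining open-cell set, removing every cell with at most one remaining neighbour each pass until a fixpoint is reached.
import Mathlib
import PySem

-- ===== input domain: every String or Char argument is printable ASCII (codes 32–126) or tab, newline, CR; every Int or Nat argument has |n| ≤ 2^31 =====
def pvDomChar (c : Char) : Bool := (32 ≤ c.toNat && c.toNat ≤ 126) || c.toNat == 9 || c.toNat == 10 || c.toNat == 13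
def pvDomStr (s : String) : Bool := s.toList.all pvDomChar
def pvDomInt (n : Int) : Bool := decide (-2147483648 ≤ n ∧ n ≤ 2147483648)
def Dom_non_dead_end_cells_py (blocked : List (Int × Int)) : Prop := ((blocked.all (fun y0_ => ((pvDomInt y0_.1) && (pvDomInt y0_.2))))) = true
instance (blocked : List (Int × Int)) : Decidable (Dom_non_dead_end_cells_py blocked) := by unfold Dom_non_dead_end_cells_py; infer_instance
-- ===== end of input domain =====

-- B replaces A's queue with incrementally maintained degree table by repeated full
-- rescans of the remaining set, removing every degree≤1 cell each pass until a
-- fixpoint (objective: alternative decomposition, not claimed faster).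

-- _DELTAS.values() in insertion order (module constant shared by A and B)
def pvDeltas : List (Int × Int) := [(0, -1), (0, 1), (-1, 0), (1, 0)]

-- the open_cells set comprehension (textually identical in A and in B)
def pvOpenCells (blocked : List (Int × Int)) : PySem.Set (Int × Int) :=
  (PySem.List.pyRange 1 (12 - 1) 1).foldl (fun s y =>
    (PySem.List.pyRange 1 (12 - 1) 1).foldl (fun s x =>
      if (x, y) ∈ blocked then s else PySem.Set.add s (x, y)) s) []

-- sum((c[0]+dx, c[1]+dy) in S for dx, dy in _DELTAS.values())   (identical in A and B)
def pvDeg (S : List (Int × Int)) (c : Int × Int) : Int :=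
  (pvDeltas.map (fun d => if (c.1 + d.1, c.2 + d.2) ∈ S then (1 : Int) else 0)).sum

-- ===== PORT A =====
-- body of A's inner 'for dx, dy in _DELTAS.values()' neighbour update
def pvStepA (removed : PySem.Set (Int × Int)) (cell : Int × Int)
    (st : List (Int × Int) × PySem.Dict (Int × Int) Int) (d : Int × Int) :
    List (Int × Int) × PySem.Dict (Int × Int) Int :=
  let n := (cell.1 + d.1, cell.2 + d.2)
  if !(st.2.contains n) || removed.contains n then st
  else
    let dg := st.2.modify n 0 (· - 1)
    if dg.getD n 0 ≤ 1 then (st.1 ++ [n], dg) else (st.1, dg)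

-- A's 'while head < len(queue)' loop; the fuel only makes it total and the
-- caller's fuel provably suffices (each iteration advances head by one and the
-- queue grows by at most 4 per removal, every removed cell coming from open_cells)
def pvLoopA : Nat → List (Int × Int) → Nat → PySem.Set (Int × Int) →
    PySem.Dict (Int × Int) Int → PySem.Set (Int × Int)
  | 0, _, _, removed, _ => removed
  | fuel + 1, queue, head, removed, degrees =>
    if head < queue.length then
      let cell := queue.getD head (0, 0)
      if removed.contains cell then pvLoopA fuel queue (head + 1) removed degrees
      else
        let removed' := PySem.Set.add removed cell
        let st := pvDeltas.foldl (pvStepA removed' cell) (queue, degrees)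
        pvLoopA fuel st.1 (head + 1) removed' st.2
    else removed

def non_dead_end_cells_py (blocked : List (Int × Int)) : List (Int × Int) :=
  let O := pvOpenCells blocked
  let degrees : PySem.Dict (Int × Int) Int :=
    O.foldl (fun d c => d.insert c (pvDeg O c)) PySem.Dict.empty
  let queue := degrees.items.foldl (fun q p => if p.2 ≤ 1 then q ++ [p.1] else q) []
  let removed := pvLoopA (queue.length + 4 * O.length + 1) queue 0 [] degrees
  PySem.Set.diff O removed

-- ===== PORT B =====
-- termination helper for pvLoopB (cited by its decreasing_by)
theorem pvLoopB_dec {remaining toRemove : List (Int × Int)}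
    (hsub : ∀ x ∈ toRemove, x ∈ remaining) (h : ¬ toRemove = []) :
    (PySem.Set.diff remaining toRemove).length < remaining.length := by
  obtain ⟨x, hx⟩ := List.exists_mem_of_ne_nil _ h
  have hxr : x ∈ remaining := hsub x hx
  have h1 : (PySem.Set.diff remaining toRemove).length ≤ remaining.length :=
    List.length_filter_le _ _
  rcases Nat.lt_or_ge (PySem.Set.diff remaining toRemove).length remaining.length with hlt | hge
  · exact hlt
  · exfalso
    have hall := (List.length_filter_eq_length_iff).mp (Nat.le_antisymm h1 hge)
    have h2 := hall x hxr
    rw [Bool.not_eq_eq_eq_not, Bool.not_true] at h2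
    simp at h2
    exact h2 hx

-- B's fixpoint loop: rescan, remove all current degree≤1 cells, repeat until nothing changes
def pvLoopB (remaining : PySem.Set (Int × Int)) : PySem.Set (Int × Int) :=
  let toRemove := PySem.Set.ofList (remaining.filter (fun c => decide (pvDeg remaining c ≤ 1)))
  if h : toRemove = [] then remaining
  else pvLoopB (PySem.Set.diff remaining toRemove)
termination_by remaining.length
decreasing_by
  refine pvLoopB_dec ?_ h
  intro x hx
  rw [PySem.Set.mem_ofList] at hx
  simp at hx
  exact hx.1

def non_dead_end_cells_py_alt (blocked : List (Int × Int)) : List (Int × Int) :=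
  pvLoopB (PySem.Set.ofList (pvOpenCells blocked))

-- ===== PRECONDITION & SPEC =====
def Spec_non_dead_end_cells_py (blocked : List (Int × Int)) (out : List (Int × Int)) : Prop := out = non_dead_end_cells_py_alt blocked
instance (blocked : List (Int × Int)) (out : List (Int × Int)) : Decidable (Spec_non_dead_end_cells_py blocked out) := by unfold Spec_non_dead_end_cells_py; infer_instance

-- ===== CLAIM (what is proved, stated in full; the proofs are below) =====
def Claim_equal_non_dead_end_cells_py : Prop := ∀ (blocked : List (Int × Int)), Dom_non_dead_end_cells_py blocked → Spec_non_dead_end_cells_py blocked (non_dead_end_cells_py blocked)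

-- ===== LEMMAS AND PROOFS =====

-- number of the four grid neighbours of c satisfying P
def pvNdeg (P : Int × Int → Bool) (c : Int × Int) : Nat :=
  pvDeltas.countP (fun d => P (c.1 + d.1, c.2 + d.2))

-- membership predicate of the set difference O \ removed
def pvRem (O removed : List (Int × Int)) : (Int × Int) → Bool :=
  fun c => decide (c ∈ O) && !(removed.contains c)

theorem pvDeg_eq (S : List (Int × Int)) (c : Int × Int) :
    pvDeg S c = (pvNdeg (fun y => decide (y ∈ S)) c : Int) := by
  unfold pvDeg pvNdeg
  rw [← PySem.List.sum_map_ite_one_zero (fun d => decide ((c.1 + d.1, c.2 + d.2) ∈ S)) pvDeltas]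
  simp

theorem pvNdeg_mono {P Q : Int × Int → Bool} (h : ∀ y, P y = true → Q y = true)
    (c : Int × Int) : pvNdeg P c ≤ pvNdeg Q c :=
  List.countP_mono_left (fun d _ hp => h _ hp)

theorem pvNdeg_congr {P Q : Int × Int → Bool} (h : ∀ y, P y = Q y) (c : Int × Int) :
    pvNdeg P c = pvNdeg Q c :=
  List.countP_congr (fun d _ => by rw [h])

-- the four-neighbour relation is symmetric
theorem pvNbr_symm (c x : Int × Int) :
    (∃ d ∈ pvDeltas, (c.1 + d.1, c.2 + d.2) = x) ↔ (∃ d ∈ pvDeltas, (x.1 + d.1, x.2 + d.2) = c) := by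
  obtain ⟨c1, c2⟩ := c; obtain ⟨x1, x2⟩ := x
  constructor <;> rintro ⟨d, hd, he⟩ <;>
    simp only [pvDeltas, List.mem_cons, List.not_mem_nil, or_false] at hd <;>
    rcases hd with rfl | rfl | rfl | rfl <;>
    simp only [Prod.mk.injEq] at he <;>
    obtain ⟨he1, he2⟩ := he <;>
    first
    | exact ⟨(0,-1), by simp [pvDeltas], by simp only [Prod.mk.injEq]; omega⟩
    | exact ⟨(0,1), by simp [pvDeltas], by simp only [Prod.mk.injEq]; omega⟩
    | exact ⟨(-1,0), by simp [pvDeltas], by simp only [Prod.mk.injEq]; omega⟩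
    | exact ⟨(1,0), by simp [pvDeltas], by simp only [Prod.mk.injEq]; omega⟩

-- removing one element from the counted predicate decrements the count at most once
theorem pvCountP_sub_one (x cell : Int × Int) (P : Int × Int → Bool) :
    ∀ (l : List (Int × Int)),
    (l.map (fun d => (x.1 + d.1, x.2 + d.2))).Nodup →
    (l.countP (fun d => P (x.1 + d.1, x.2 + d.2) && !((x.1 + d.1, x.2 + d.2) == cell)) : Int)
      = (l.countP (fun d => P (x.1 + d.1, x.2 + d.2)) : Int)
        - (if P cell = true ∧ (∃ d ∈ l, (x.1 + d.1, x.2 + d.2) = cell) then 1 else 0) := by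
  intro l
  induction l with
  | nil => simp
  | cons d t ih =>
    intro hnd
    simp only [List.map_cons, List.nodup_cons] at hnd
    obtain ⟨hd, ht⟩ := hnd
    by_cases hc : (x.1 + d.1, x.2 + d.2) = cell
    · have htail : ¬ ∃ d' ∈ t, (x.1 + d'.1, x.2 + d'.2) = cell := by
        rintro ⟨d', hd', he⟩
        exact hd ((List.mem_map).mpr ⟨d', hd', by rw [he, hc]⟩)
      have hcongr : t.countP (fun d => P (x.1 + d.1, x.2 + d.2) && !((x.1 + d.1, x.2 + d.2) == cell))
          = t.countP (fun d => P (x.1 + d.1, x.2 + d.2)) := by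
        apply List.countP_congr
        intro d' hd'
        have : ¬ ((x.1 + d'.1, x.2 + d'.2) = cell) := fun he => htail ⟨d', hd', he⟩
        simp [this]
      rw [List.countP_cons, List.countP_cons, hcongr]
      by_cases hP : P cell = true
      · simp [hc, hP, htail]
      · simp [hc, hP]
    · have := ih ht
      rw [List.countP_cons, List.countP_cons]
      push_cast
      rw [this]
      have hex : (∃ d' ∈ d :: t, (x.1 + d'.1, x.2 + d'.2) = cell) ↔ (∃ d' ∈ t, (x.1 + d'.1, x.2 + d'.2) = cell) := by
        constructor
        · rintro ⟨d', hd', he⟩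
          rcases List.mem_cons.mp hd' with rfl | h
          · exact absurd he hc
          · exact ⟨d', h, he⟩
        · rintro ⟨d', hd', he⟩; exact ⟨d', List.mem_cons_of_mem _ hd', he⟩
      simp only [hex]
      clear this ih
      by_cases hP : P (x.1 + d.1, x.2 + d.2) = true <;> simp [hc, hP] <;> split_ifs <;> omega

-- loop invariant of A's while loop
def pvInvA (O queue : List (Int × Int)) (head : Nat) (removed : List (Int × Int))
    (degrees : PySem.Dict (Int × Int) Int) : Prop :=
  removed.Nodup ∧ (∀ c ∈ removed, c ∈ O) ∧ (∀ c ∈ queue, c ∈ O) ∧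
  (∀ x, degrees.contains x = true ↔ x ∈ O) ∧
  (∀ x ∈ O, x ∉ removed → degrees.getD x 0 = (pvNdeg (pvRem O removed) x : Int)) ∧
  (∀ x ∈ O, x ∉ removed → degrees.getD x 0 ≤ 1 → x ∈ queue.drop head) ∧
  (∀ c ∈ queue, degrees.getD c 0 ≤ 1)

-- effect of the inner neighbour-update fold of A
theorem pvFoldA_spec (O : List (Int × Int)) (removed' : List (Int × Int)) (cell : Int × Int) :
    ∀ (ds : List (Int × Int)) (q : List (Int × Int)) (dg : PySem.Dict (Int × Int) Int)
      (st : List (Int × Int) × PySem.Dict (Int × Int) Int),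
      st = ds.foldl (pvStepA removed' cell) (q, dg) →
      ((ds.map (fun d => (cell.1 + d.1, cell.2 + d.2))).Nodup) →
      (∀ x, dg.contains x = true ↔ x ∈ O) →
      ∃ E : List (Int × Int),
        st.1 = q ++ E ∧
        E.length ≤ ds.length ∧
        (∀ n ∈ E, n ∈ O) ∧
        (∀ x, st.2.contains x = true ↔ x ∈ O) ∧
        (∀ x, st.2.getD x 0 = dg.getD x 0 -
          (if (x ∈ O ∧ x ∉ removed' ∧ ∃ d ∈ ds, (cell.1 + d.1, cell.2 + d.2) = x) then 1 else 0)) ∧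
        (∀ x, st.2.getD x 0 ≤ dg.getD x 0) ∧
        (∀ x, x ∈ O → x ∉ removed' → st.2.getD x 0 ≤ 1 → dg.getD x 0 ≤ 1 ∨ x ∈ E) ∧
        (∀ n ∈ E, st.2.getD n 0 ≤ 1) := by
  intro ds
  induction ds with
  | nil =>
    intro q dg st hst _ hkeys
    subst hst
    exact ⟨[], by simp, by simp, by simp, hkeys, by simp, fun x => le_refl _,
      fun x _ _ _ => Or.inl ‹_›, by simp⟩
  | cons d ds' ih =>
    intro q dg st hst hnd hkeys
    simp only [List.map_cons, List.nodup_cons] at hnd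
    obtain ⟨hdn, hnd'⟩ := hnd
    rw [List.foldl_cons] at hst
    by_cases h1 : (!(dg.contains (cell.1 + d.1, cell.2 + d.2)) || PySem.Set.contains removed' (cell.1 + d.1, cell.2 + d.2)) = true
    · -- skipped neighbour: state unchanged for this delta
      have hstep : pvStepA removed' cell (q, dg) d = (q, dg) := by
        simp only [pvStepA]; rw [if_pos h1]
      rw [hstep] at hst
      obtain ⟨E, he1, he2, he3, he4, he5, he6, he7, he8⟩ := ih q dg st hst hnd' hkeys
      have hn : ¬ ((cell.1 + d.1, cell.2 + d.2) ∈ O ∧ (cell.1 + d.1, cell.2 + d.2) ∉ removed') := by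
        rcases Bool.or_eq_true_iff.mp h1 with h | h
        · intro ⟨hO', _⟩
          rw [Bool.not_eq_eq_eq_not, Bool.not_true] at h
          exact absurd ((hkeys _).mpr hO') (by simp [h])
        · intro ⟨_, hrem⟩
          rw [PySem.Set.contains_iff] at h
          exact hrem h
      refine ⟨E, he1, by simp [List.length_cons]; omega, he3, he4, ?_, he6, he7, he8⟩
      intro x
      rw [he5 x]
      congr 1
      have hiff : (x ∈ O ∧ x ∉ removed' ∧ ∃ d' ∈ ds', (cell.1 + d'.1, cell.2 + d'.2) = x)
          ↔ (x ∈ O ∧ x ∉ removed' ∧ ∃ d' ∈ d :: ds', (cell.1 + d'.1, cell.2 + d'.2) = x) := by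
        constructor
        · rintro ⟨hA, hB, d', hd', he⟩
          exact ⟨hA, hB, d', List.mem_cons_of_mem _ hd', he⟩
        · rintro ⟨hA, hB, d', hd', he⟩
          rcases List.mem_cons.mp hd' with rfl | hmem
          · exact absurd ⟨he ▸ hA, he ▸ hB⟩ hn
          · exact ⟨hA, hB, d', hmem, he⟩
      simp only [hiff]
    · -- live neighbour: decrement, maybe enqueue
      rw [Bool.not_eq_true] at h1
      have hcont : dg.contains (cell.1 + d.1, cell.2 + d.2) = true := by
        rcases Bool.or_eq_false_iff.mp h1 with ⟨ha, _⟩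
        simpa using ha
      have hremn : (cell.1 + d.1, cell.2 + d.2) ∉ removed' := by
        rcases Bool.or_eq_false_iff.mp h1 with ⟨_, hb⟩
        intro hmem
        rw [(PySem.Set.contains_iff removed' _).mpr hmem] at hb
        simp at hb
      have hnO : (cell.1 + d.1, cell.2 + d.2) ∈ O := (hkeys _).mp hcont
      have hgetD1 : ∀ x, (dg.modify (cell.1 + d.1, cell.2 + d.2) 0 (· - 1)).getD x 0
          = if x = (cell.1 + d.1, cell.2 + d.2) then dg.getD (cell.1 + d.1, cell.2 + d.2) 0 - 1 else dg.getD x 0 :=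
        fun x => PySem.Dict.getD_modify dg _ x 0 (· - 1)
      have hkeys1 : ∀ x, (dg.modify (cell.1 + d.1, cell.2 + d.2) 0 (· - 1)).contains x = true ↔ x ∈ O := by
        intro x
        rw [PySem.Dict.contains_modify]
        constructor
        · intro hx
          rcases Bool.or_eq_true_iff.mp hx with hx | hx
          · have : x = (cell.1 + d.1, cell.2 + d.2) := by simpa using hx
            rw [this]; exact hnO
          · exact (hkeys x).mp hx
        · intro hx
          rw [Bool.or_eq_true_iff]; exact Or.inr ((hkeys x).mpr hx)
      have hmono1 : ∀ x, (dg.modify (cell.1 + d.1, cell.2 + d.2) 0 (· - 1)).getD x 0 ≤ dg.getD x 0 := by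
        intro x
        rw [hgetD1 x]
        split_ifs with hh
        · rw [hh]; omega
        · omega
      -- the decrement composed with the tail fold equals the full decrement
      have hfix : ∀ x, (dg.modify (cell.1 + d.1, cell.2 + d.2) 0 (· - 1)).getD x 0
            - (if (x ∈ O ∧ x ∉ removed' ∧ ∃ d' ∈ ds', (cell.1 + d'.1, cell.2 + d'.2) = x) then 1 else 0)
          = dg.getD x 0
            - (if (x ∈ O ∧ x ∉ removed' ∧ ∃ d' ∈ d :: ds', (cell.1 + d'.1, cell.2 + d'.2) = x) then 1 else 0) := by
        intro x
        rw [hgetD1 x]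
        by_cases hx : x = (cell.1 + d.1, cell.2 + d.2)
        · rw [if_pos hx]
          rw [hx]
          have hnoA : ¬ (∃ d' ∈ ds', (cell.1 + d'.1, cell.2 + d'.2) = (cell.1 + d.1, cell.2 + d.2)) := by
            rintro ⟨d', hd', he⟩
            exact hdn (List.mem_map.mpr ⟨d', hd', he⟩)
          rw [if_neg (by rintro ⟨_, _, hex⟩; exact hnoA hex)]
          rw [if_pos ⟨hnO, hremn, d, List.mem_cons_self, rfl⟩]
          ring
        · rw [if_neg hx]
          congr 1
          have hiff : (x ∈ O ∧ x ∉ removed' ∧ ∃ d' ∈ ds', (cell.1 + d'.1, cell.2 + d'.2) = x)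
              ↔ (x ∈ O ∧ x ∉ removed' ∧ ∃ d' ∈ d :: ds', (cell.1 + d'.1, cell.2 + d'.2) = x) := by
            constructor
            · rintro ⟨hA, hB, d', hd', he⟩
              exact ⟨hA, hB, d', List.mem_cons_of_mem _ hd', he⟩
            · rintro ⟨hA, hB, d', hd', he⟩
              rcases List.mem_cons.mp hd' with rfl | hmem
              · exact absurd he.symm hx
              · exact ⟨hA, hB, d', hmem, he⟩
          simp only [hiff]
      have hstep : pvStepA removed' cell (q, dg) d
          = (if (dg.modify (cell.1 + d.1, cell.2 + d.2) 0 (· - 1)).getD (cell.1 + d.1, cell.2 + d.2) 0 ≤ 1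
              then q ++ [(cell.1 + d.1, cell.2 + d.2)] else q,
             dg.modify (cell.1 + d.1, cell.2 + d.2) 0 (· - 1)) := by
        simp only [pvStepA]
        rw [if_neg (by rw [h1]; simp)]
        split <;> rfl
      rw [hstep] at hst
      by_cases happ : (dg.modify (cell.1 + d.1, cell.2 + d.2) 0 (· - 1)).getD (cell.1 + d.1, cell.2 + d.2) 0 ≤ 1
      · rw [if_pos happ] at hst
        obtain ⟨E', he1, he2, he3, he4, he5, he6, he7, he8⟩ :=
          ih (q ++ [(cell.1 + d.1, cell.2 + d.2)]) _ st hst hnd' hkeys1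
        refine ⟨(cell.1 + d.1, cell.2 + d.2) :: E', by rw [he1]; simp,
          by simp [List.length_cons]; omega, ?_, he4, ?_, ?_, ?_, ?_⟩
        · intro m hm
          rcases List.mem_cons.mp hm with rfl | hm
          · exact hnO
          · exact he3 m hm
        · intro x
          rw [he5 x, hfix x]
        · intro x
          calc st.2.getD x 0 ≤ (dg.modify (cell.1 + d.1, cell.2 + d.2) 0 (· - 1)).getD x 0 := he6 x
          _ ≤ dg.getD x 0 := hmono1 x
        · intro x hxO hxrem hxle
          rcases he7 x hxO hxrem hxle with hle1 | hE'
          · rw [hgetD1 x] at hle1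
            split_ifs at hle1 with hh
            · exact Or.inr (hh ▸ List.mem_cons_self)
            · exact Or.inl hle1
          · exact Or.inr (List.mem_cons_of_mem _ hE')
        · intro m hm
          rcases List.mem_cons.mp hm with rfl | hm
          · calc st.2.getD _ 0 ≤ (dg.modify (cell.1 + d.1, cell.2 + d.2) 0 (· - 1)).getD _ 0 := he6 _
            _ ≤ 1 := happ
          · exact he8 m hm
      · rw [if_neg happ] at hst
        obtain ⟨E', he1, he2, he3, he4, he5, he6, he7, he8⟩ := ih q _ st hst hnd' hkeys1
        refine ⟨E', he1, by simp [List.length_cons]; omega, he3, he4, ?_, ?_, ?_, he8⟩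
        · intro x
          rw [he5 x, hfix x]
        · intro x
          calc st.2.getD x 0 ≤ (dg.modify (cell.1 + d.1, cell.2 + d.2) 0 (· - 1)).getD x 0 := he6 x
          _ ≤ dg.getD x 0 := hmono1 x
        · intro x hxO hxrem hxle
          rcases he7 x hxO hxrem hxle with hle1 | hE'
          · rw [hgetD1 x] at hle1
            split_ifs at hle1 with hh
            · exfalso
              apply happ
              rw [hgetD1 (cell.1 + d.1, cell.2 + d.2), if_pos rfl]
              exact hle1
            · exact Or.inl hle1
          · exact Or.inr hE'

-- conclusions of the master lemma at a terminated loop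
theorem pvTermA (O queue : List (Int × Int)) (head : Nat) (removed : List (Int × Int))
    (degrees : PySem.Dict (Int × Int) Int)
    (hinv : pvInvA O queue head removed degrees) (hlen : queue.length ≤ head) :
    (∀ c ∈ removed, c ∈ O) ∧
    (∀ x ∈ O, x ∉ removed → 2 ≤ pvNdeg (pvRem O removed) x) ∧
    (∀ S : List (Int × Int), (∀ c ∈ S, c ∈ O) →
      (∀ c ∈ S, 2 ≤ pvNdeg (fun y => decide (y ∈ S)) c) →
      (∀ c ∈ S, c ∉ removed) → ∀ c ∈ S, c ∉ removed) := by
  obtain ⟨hnd, hremO, hqO, hkeys, hdeg, htrig, hqdeg⟩ := hinv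
  refine ⟨hremO, ?_, fun S _ _ h => h⟩
  intro x hxO hxrem
  have hdrop : queue.drop head = [] := List.drop_eq_nil_of_le hlen
  have h1 : ¬ (degrees.getD x 0 ≤ 1) := by
    intro hle
    have := htrig x hxO hxrem hle
    rw [hdrop] at this
    exact absurd this (List.not_mem_nil)
  rw [hdeg x hxO hxrem] at h1
  omega

-- master lemma: what A's while loop computes
theorem pvLoopA_spec (O : List (Int × Int)) (hO : O.Nodup) :
    ∀ (fuel : Nat) (queue : List (Int × Int)) (head : Nat) (removed : List (Int × Int))
      (degrees : PySem.Dict (Int × Int) Int),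
      pvInvA O queue head removed degrees →
      queue.length + 4 * O.length < fuel + head + 4 * removed.length →
      (∀ c ∈ pvLoopA fuel queue head removed degrees, c ∈ O) ∧
      (∀ x ∈ O, x ∉ pvLoopA fuel queue head removed degrees →
        2 ≤ pvNdeg (pvRem O (pvLoopA fuel queue head removed degrees)) x) ∧
      (∀ S : List (Int × Int), (∀ c ∈ S, c ∈ O) →
        (∀ c ∈ S, 2 ≤ pvNdeg (fun y => decide (y ∈ S)) c) →
        (∀ c ∈ S, c ∉ removed) →
        ∀ c ∈ S, c ∉ pvLoopA fuel queue head removed degrees) := by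
  intro fuel
  induction fuel with
  | zero =>
    intro queue head removed degrees hinv hfuel
    have hcard : removed.length ≤ O.length :=
      (List.subperm_of_subset hinv.1 (fun c hc => hinv.2.1 c hc)).length_le
    have hlen : queue.length ≤ head := by omega
    obtain ⟨t1, t2, _⟩ := pvTermA O queue head removed degrees hinv hlen
    exact ⟨t1, t2, fun S _ _ h3 => h3⟩
  | succ m ih =>
    intro queue head removed degrees hinv hfuel
    by_cases hl : head < queue.length
    · have heq : pvLoopA (m + 1) queue head removed degrees
          = if removed.contains (queue.getD head (0, 0)) then
              pvLoopA m queue (head + 1) removed degrees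
            else
              pvLoopA m (pvDeltas.foldl (pvStepA (PySem.Set.add removed (queue.getD head (0, 0))) (queue.getD head (0, 0))) (queue, degrees)).1
                (head + 1) (PySem.Set.add removed (queue.getD head (0, 0)))
                (pvDeltas.foldl (pvStepA (PySem.Set.add removed (queue.getD head (0, 0))) (queue.getD head (0, 0))) (queue, degrees)).2 := by
        show (if head < queue.length then _ else _) = _
        rw [if_pos hl]
        rfl
      obtain ⟨hnd, hremO, hqO, hkeys, hdeg, htrig, hqdeg⟩ := hinv
      have hcellq : queue.getD head (0, 0) ∈ queue := by
        rw [List.getD_eq_getElem queue (0, 0) hl]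
        exact List.getElem_mem hl
      set cell := queue.getD head (0, 0) with hcelldef
      have hcellO : cell ∈ O := hqO cell hcellq
      by_cases hre : removed.contains cell = true
      · -- already removed: just advance head
        rw [heq, if_pos hre]
        apply ih queue (head + 1) removed degrees
        · refine ⟨hnd, hremO, hqO, hkeys, hdeg, ?_, hqdeg⟩
          intro x hxO hxrem hxle
          have hx := htrig x hxO hxrem hxle
          rw [List.drop_eq_getElem_cons hl] at hx
          rcases List.mem_cons.mp hx with heq' | hx'
          · exfalso
            apply hxrem
            rw [heq', ← List.getD_eq_getElem queue (0, 0) hl]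
            exact (PySem.Set.contains_iff removed _).mp hre
          · exact hx'
        · omega
      · -- fresh removal: add cell, update the four neighbours
        rw [heq, if_neg hre]
        have hcellrem : cell ∉ removed := fun hmem =>
          hre ((PySem.Set.contains_iff removed cell).mpr hmem)
        have hrem' : PySem.Set.add removed cell = removed ++ [cell] :=
          PySem.Set.add_of_not_mem hcellrem
        have hmemrem' : ∀ y, y ∈ PySem.Set.add removed cell ↔ y ∈ removed ∨ y = cell :=
          fun y => PySem.Set.mem_add removed cell y
        have hndmap : ((pvDeltas.map (fun d => (cell.1 + d.1, cell.2 + d.2))).Nodup) := by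
          obtain ⟨c1, c2⟩ := cell
          simp [pvDeltas, Prod.ext_iff]
        obtain ⟨E, he1, he2, he3, he4, he5, he6, he7, he8⟩ :=
          pvFoldA_spec O (PySem.Set.add removed cell) cell pvDeltas queue degrees _ rfl hndmap hkeys
        have hremBool : ∀ y, pvRem O (PySem.Set.add removed cell) y
            = (pvRem O removed y && !(y == cell)) := by
          intro y
          unfold pvRem
          by_cases h3 : y = cell
          · subst h3
            by_cases h1 : cell ∈ O <;> simp [h1, hcellrem]
          · by_cases h1 : y ∈ O <;> by_cases h2 : y ∈ removed <;> simp [h1, h2, h3, hmemrem' y]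
        -- the new degree table describes O minus the enlarged removed set
        have hdeg' : ∀ x ∈ O, x ∉ PySem.Set.add removed cell →
            (pvDeltas.foldl (pvStepA (PySem.Set.add removed cell) cell) (queue, degrees)).2.getD x 0
              = (pvNdeg (pvRem O (PySem.Set.add removed cell)) x : Int) := by
          intro x hxO hxrem'
          have hxrem : x ∉ removed := fun hmem => hxrem' ((hmemrem' x).mpr (Or.inl hmem))
          rw [he5 x, hdeg x hxO hxrem]
          have hcount : pvNdeg (pvRem O (PySem.Set.add removed cell)) x
              = pvDeltas.countP (fun d => pvRem O removed (x.1 + d.1, x.2 + d.2) && !((x.1 + d.1, x.2 + d.2) == cell)) := by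
            unfold pvNdeg
            apply List.countP_congr
            intro d _
            rw [hremBool]
          rw [hcount, pvCountP_sub_one x cell (pvRem O removed) pvDeltas (by
            obtain ⟨x1, x2⟩ := x
            simp [pvDeltas, Prod.ext_iff])]
          unfold pvNdeg
          congr 1
          -- the two removal conditions agree
          by_cases hnbr : ∃ d ∈ pvDeltas, (cell.1 + d.1, cell.2 + d.2) = x
          · rw [if_pos ⟨hxO, hxrem', hnbr⟩]
            have hPcell : pvRem O removed cell = true := by
              unfold pvRem
              simp [hcellO, hcellrem]
            rw [if_pos ⟨hPcell, (pvNbr_symm cell x).mp hnbr⟩]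
          · rw [if_neg (by rintro ⟨_, _, hx⟩; exact hnbr hx)]
            rw [if_neg (by
              rintro ⟨_, hx⟩
              exact hnbr ((pvNbr_symm cell x).mpr hx))]
        -- re-establish the full invariant and recurse
        have hinv' : pvInvA O (pvDeltas.foldl (pvStepA (PySem.Set.add removed cell) cell) (queue, degrees)).1
            (head + 1) (PySem.Set.add removed cell)
            (pvDeltas.foldl (pvStepA (PySem.Set.add removed cell) cell) (queue, degrees)).2 := by
          refine ⟨PySem.Set.nodup_add removed cell hnd, ?_, ?_, he4, hdeg', ?_, ?_⟩
          · intro c hc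
            rcases (hmemrem' c).mp hc with h | h
            · exact hremO c h
            · rw [h]; exact hcellO
          · intro c hc
            rw [he1] at hc
            rcases List.mem_append.mp hc with h | h
            · exact hqO c h
            · exact he3 c h
          · -- trigger invariant
            intro x hxO hxrem' hxle
            have hxrem : x ∉ removed := fun hmem => hxrem' ((hmemrem' x).mpr (Or.inl hmem))
            have hxne : x ≠ cell := fun hc => hxrem' ((hmemrem' x).mpr (Or.inr hc))
            have hdrop : ((pvDeltas.foldl (pvStepA (PySem.Set.add removed cell) cell) (queue, degrees)).1).drop (head + 1)
                = queue.drop (head + 1) ++ E := by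
              rw [he1, List.drop_append_of_le_length (by omega)]
            rcases he7 x hxO hxrem' hxle with hold | hE
            · have hx := htrig x hxO hxrem hold
              rw [List.drop_eq_getElem_cons hl] at hx
              rcases List.mem_cons.mp hx with heq' | hx'
              · exact absurd (by rw [heq', hcelldef, List.getD_eq_getElem queue (0, 0) hl]) hxne
              · rw [hdrop]; exact List.mem_append.mpr (Or.inl hx')
            · rw [hdrop]; exact List.mem_append.mpr (Or.inr hE)
          · -- every queued cell has recorded degree ≤ 1
            intro c hc
            rw [he1] at hc
            rcases List.mem_append.mp hc with h | h
            · calc (pvDeltas.foldl (pvStepA (PySem.Set.add removed cell) cell) (queue, degrees)).2.getD c 0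
                  ≤ degrees.getD c 0 := he6 c
              _ ≤ 1 := hqdeg c h
            · exact he8 c h
        have hfuel' : ((pvDeltas.foldl (pvStepA (PySem.Set.add removed cell) cell) (queue, degrees)).1).length
            + 4 * O.length < m + (head + 1) + 4 * (PySem.Set.add removed cell).length := by
          have hlen1 : ((pvDeltas.foldl (pvStepA (PySem.Set.add removed cell) cell) (queue, degrees)).1).length
              = queue.length + E.length := by rw [he1, List.length_append]
          have hlen2 : (PySem.Set.add removed cell).length = removed.length + 1 := by
            rw [hrem', List.length_append, List.length_cons, List.length_nil]
          have hE4 : E.length ≤ 4 := by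
            have := he2
            simp [pvDeltas] at this
            omega
          omega
        obtain ⟨i1, i2, i3⟩ := ih _ (head + 1) _ _ hinv' hfuel'
        refine ⟨i1, i2, ?_⟩
        intro S hS1 hS2 hS3
        have hS3' : ∀ c ∈ S, c ∉ PySem.Set.add removed cell := by
          intro c hc hmem
          rcases (hmemrem' c).mp hmem with h | h
          · exact hS3 c hc h
          · -- cell would be a cell of a closed subset but is queued with degree ≤ 1
            have hle := hqdeg cell hcellq
            rw [hdeg cell hcellO hcellrem] at hle
            have h2 : 2 ≤ pvNdeg (fun y => decide (y ∈ S)) cell := h ▸ hS2 c hc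
            have hmono : pvNdeg (fun y => decide (y ∈ S)) cell ≤ pvNdeg (pvRem O removed) cell := by
              apply pvNdeg_mono
              intro y hy
              have hyS : y ∈ S := by simpa using hy
              unfold pvRem
              simp [hS1 y hyS, hS3 y hyS]
            omega
        exact i3 S hS1 hS2 hS3'
    · -- head has reached the end of the queue: the loop returns removed
      have heq : pvLoopA (m + 1) queue head removed degrees = removed := by
        show (if head < queue.length then _ else _) = _
        rw [if_neg hl]
      rw [heq]
      obtain ⟨t1, t2, _⟩ := pvTermA O queue head removed degrees hinv (Nat.le_of_not_lt hl)
      exact ⟨t1, t2, fun S _ _ h3 => h3⟩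

-- clean unfolding equation for pvLoopB
theorem pvLoopB_eq (R : PySem.Set (Int × Int)) :
    pvLoopB R =
      if PySem.Set.ofList (R.filter (fun c => decide (pvDeg R c ≤ 1))) = [] then R
      else pvLoopB (PySem.Set.diff R (PySem.Set.ofList (R.filter (fun c => decide (pvDeg R c ≤ 1))))) := by
  conv_lhs => rw [pvLoopB]
  simp

-- everything B's fixpoint loop guarantees, in one strong induction
theorem pvLoopB_main : ∀ (n : Nat) (R : List (Int × Int)), R.length ≤ n → R.Nodup →
    (∀ c ∈ pvLoopB R, c ∈ R) ∧
    (∀ c ∈ pvLoopB R, 2 ≤ pvNdeg (fun y => decide (y ∈ pvLoopB R)) c) ∧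
    (∀ S : List (Int × Int), (∀ c ∈ S, c ∈ R) →
      (∀ c ∈ S, 2 ≤ pvNdeg (fun y => decide (y ∈ S)) c) → ∀ c ∈ S, c ∈ pvLoopB R) ∧
    (∃ pf : (Int × Int) → Bool, pvLoopB R = R.filter pf) := by
  intro n
  induction n with
  | zero =>
    intro R hlen hnd
    have hR : R = [] := List.length_eq_zero_iff.mp (Nat.le_zero.mp hlen)
    subst hR
    rw [pvLoopB_eq]
    simp
    exact fun S h _ a b hab => h a b hab
  | succ m ih =>
    intro R hlen hnd
    have hT : PySem.Set.ofList (R.filter (fun c => decide (pvDeg R c ≤ 1)))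
        = R.filter (fun c => decide (pvDeg R c ≤ 1)) :=
      PySem.Set.ofList_eq_self_of_nodup _ (hnd.filter _)
    by_cases h0 : PySem.Set.ofList (R.filter (fun c => decide (pvDeg R c ≤ 1))) = []
    · -- fixpoint reached: pvLoopB R = R
      have hres : pvLoopB R = R := by rw [pvLoopB_eq, if_pos h0]
      rw [hT] at h0
      have hall : ∀ c ∈ R, ¬ (pvDeg R c ≤ 1) := by
        intro c hc hle
        have : c ∈ R.filter (fun c => decide (pvDeg R c ≤ 1)) := by
          simp [List.mem_filter, hc, hle]
        rw [h0] at this; exact absurd this (List.not_mem_nil)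
      refine ⟨by rw [hres]; exact fun c hc => hc, ?_, ?_, ?_⟩
      · intro c hc
        rw [hres] at hc ⊢
        have := hall c hc
        rw [pvDeg_eq] at this
        omega
      · intro S hsub _ c hc; rw [hres]; exact hsub c hc
      · exact ⟨fun _ => true, by rw [hres]; simp⟩
    · -- a pass removes something; recurse on the strictly smaller remaining set
      have hres : pvLoopB R = pvLoopB (PySem.Set.diff R
          (PySem.Set.ofList (R.filter (fun c => decide (pvDeg R c ≤ 1))))) := by
        rw [pvLoopB_eq, if_neg h0]
      rw [hT] at hres
      set T := R.filter (fun c => decide (pvDeg R c ≤ 1)) with hTdef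
      set R' := PySem.Set.diff R T with hR'def
      have hR'filter : R' = R.filter (fun c => !T.contains c) := rfl
      have hR'nd : R'.Nodup := by rw [hR'filter]; exact hnd.filter _
      have hR'len : R'.length ≤ m := by
        have : R'.length < R.length := by
          apply pvLoopB_dec (toRemove := T)
          · intro x hx; exact (List.mem_filter.mp hx).1
          · rw [hT] at h0; exact h0
        omega
      obtain ⟨ihsub, ihclosed, ihmax, ihshape⟩ := ih R' hR'len hR'nd
      have hsubR : ∀ c ∈ R', c ∈ R := by
        intro c hc; rw [hR'filter] at hc; exact (List.mem_filter.mp hc).1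
      refine ⟨?_, ?_, ?_, ?_⟩
      · intro c hc; rw [hres] at hc; exact hsubR c (ihsub c hc)
      · intro c hc; rw [hres] at hc ⊢; exact ihclosed c hc
      · -- maximality: a closed S ⊆ R survives the pass
        intro S hsub hclosed c hc
        rw [hres]
        refine ihmax S ?_ hclosed c hc
        intro a ha
        rw [hR'filter, List.mem_filter]
        refine ⟨hsub a ha, ?_⟩
        by_contra hmem
        have hmemT : a ∈ T := by simpa using hmem
        have hdeg : pvDeg R a ≤ 1 := by
          have := (List.mem_filter.mp hmemT).2; simpa using this
        have h2 : 2 ≤ pvNdeg (fun y => decide (y ∈ R)) a := by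
          calc 2 ≤ pvNdeg (fun y => decide (y ∈ S)) a := hclosed a ha
          _ ≤ pvNdeg (fun y => decide (y ∈ R)) a :=
            pvNdeg_mono (fun y hy => by simp at hy ⊢; exact hsub y hy) a
        rw [pvDeg_eq] at hdeg
        omega
      · -- the result is a filter of R
        obtain ⟨p', hp'⟩ := ihshape
        exact ⟨fun c => p' c && !T.contains c, by rw [hres, hp', hR'filter, List.filter_filter]⟩

theorem pvFilterSelfMem (l : List (Int × Int)) (p : (Int × Int) → Bool) :
    l.filter p = l.filter (fun c => decide (c ∈ l.filter p)) := by
  apply List.filter_congr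
  intro c hc
  by_cases h : p c = true <;> simp [h, hc]

-- Nodup preservation for the open_cells comprehension folds
theorem pvNodup_foldl_add {β : Type} (l : List β) (p : β → Prop) [DecidablePred p]
    (g : β → Int × Int) : ∀ (s : List (Int × Int)), s.Nodup →
    (l.foldl (fun s x => if p x then s else PySem.Set.add s (g x)) s).Nodup := by
  induction l with
  | nil => intro s hs; simpa using hs
  | cons b t ih =>
    intro s hs
    simp only [List.foldl_cons]
    by_cases hb : p b
    · simp only [if_pos hb]; exact ih s hs
    · simp only [if_neg hb]; exact ih _ (PySem.Set.nodup_add s (g b) hs)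

theorem pvNodup_foldl_pres {β : Type} (l : List β) (f : List (Int × Int) → β → List (Int × Int))
    (hf : ∀ s b, s.Nodup → (f s b).Nodup) : ∀ (s : List (Int × Int)), s.Nodup → (l.foldl f s).Nodup := by
  induction l with
  | nil => intro s hs; simpa using hs
  | cons b t ih => intro s hs; exact ih _ (hf s b hs)

theorem pvOpenCells_nodup (blocked : List (Int × Int)) : (pvOpenCells blocked).Nodup := by
  unfold pvOpenCells
  exact pvNodup_foldl_pres _ _
    (fun s y hs => pvNodup_foldl_add _ (fun x => (x, y) ∈ blocked) (fun x => (x, y)) s hs) [] (by simp)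

-- ===== VERDICT (by name: the statement is the Claim_ definition above) =====
-- the initial degree table, queue and invariant, and the two-sided inclusion
theorem non_dead_end_cells_py_spec : Claim_equal_non_dead_end_cells_py := by
  intro blocked _
  unfold Spec_non_dead_end_cells_py non_dead_end_cells_py non_dead_end_cells_py_alt
  have hO : (pvOpenCells blocked).Nodup := pvOpenCells_nodup blocked
  set O := pvOpenCells blocked with hOdef
  rw [PySem.Set.ofList_eq_self_of_nodup O hO]
  -- the built dictionary: items, keys, lookups
  have hitems : (O.foldl (fun d c => d.insert c (pvDeg O c)) PySem.Dict.empty).items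
      = O.map (fun c => (c, pvDeg O c)) := by
    rw [PySem.Dict.items_foldl_insert_fresh O (fun a => a) (fun a => pvDeg O a) PySem.Dict.empty
      (fun a _ => PySem.Dict.contains_empty a) (by simpa using hO)]
    rw [show (PySem.Dict.empty : PySem.Dict (Int × Int) Int).items = [] from rfl]
    simp
  set degrees := O.foldl (fun d c => d.insert c (pvDeg O c)) PySem.Dict.empty with hdegdef
  have hkeysO : degrees.keys = O := by
    show degrees.items.map (·.1) = O
    rw [hitems, List.map_map]
    simp [Function.comp_def]
  have hcont : ∀ x, degrees.contains x = true ↔ x ∈ O := by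
    intro x
    rw [PySem.Dict.contains_iff_mem_keys, hkeysO]
  have hget : ∀ x ∈ O, degrees.getD x 0 = pvDeg O x := by
    intro x hx
    exact PySem.Dict.getD_of_mem_items degrees
      (by rw [hitems]; exact List.mem_map.mpr ⟨x, hx, rfl⟩) (by rw [hkeysO]; exact hO) 0
  -- the initial queue is the low-degree filter of O
  have hqueue : degrees.items.foldl (fun q p => if p.2 ≤ 1 then q ++ [p.1] else q) []
      = O.filter (fun c => decide (pvDeg O c ≤ 1)) := by
    rw [PySem.List.foldl_append_ite (p := fun p : (Int × Int) × Int => p.2 ≤ 1) (f := fun p => p.1), hitems]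
    rw [List.filter_map, List.map_map]
    simp [Function.comp_def]
  set queue := degrees.items.foldl (fun q p => if p.2 ≤ 1 then q ++ [p.1] else q) [] with hqdef
  have hinv0 : pvInvA O queue 0 [] degrees := by
    refine ⟨List.nodup_nil, by simp, fun c hc => (List.mem_filter.mp (hqueue ▸ hc)).1, hcont, ?_, ?_, ?_⟩
    · intro x hxO _
      rw [hget x hxO, pvDeg_eq]
      congr 1
      apply pvNdeg_congr
      intro y
      unfold pvRem
      simp
    · intro x hxO _ hxle
      rw [List.drop_zero, hqueue, List.mem_filter]
      rw [hget x hxO] at hxle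
      exact ⟨hxO, by simpa using hxle⟩
    · intro c hc
      rw [hqueue] at hc
      rw [hget c (List.mem_filter.mp hc).1]
      simpa using (List.mem_filter.mp hc).2
  obtain ⟨hA1, hA2, hA3⟩ := pvLoopA_spec O hO (queue.length + 4 * O.length + 1) queue 0 [] degrees hinv0 (by omega)
  set Rm := pvLoopA (queue.length + 4 * O.length + 1) queue 0 [] degrees with hRmdef
  obtain ⟨hB1, hB2, hB3, pf, hB4⟩ := pvLoopB_main O.length O le_rfl hO
  -- the two results contain exactly the same cells of O
  have hkey : ∀ c ∈ O, (c ∉ Rm ↔ c ∈ pvLoopB O) := by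
    intro c hcO
    constructor
    · intro hcR
      apply hB3 (O.filter (pvRem O Rm))
      · intro a ha; exact (List.mem_filter.mp ha).1
      · intro a ha
        have haRem : pvRem O Rm a = true := (List.mem_filter.mp ha).2
        have haO : a ∈ O := (List.mem_filter.mp ha).1
        have haR : a ∉ Rm := by
          unfold pvRem at haRem
          simp at haRem
          exact haRem.2
        have h2 := hA2 a haO haR
        have hcongr : pvNdeg (fun y => decide (y ∈ O.filter (pvRem O Rm))) a = pvNdeg (pvRem O Rm) a := by
          apply pvNdeg_congr
          intro y
          by_cases hy : pvRem O Rm y = true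
          · have hyO : y ∈ O := by
              unfold pvRem at hy
              simp at hy
              exact hy.1
            simp [List.mem_filter, hy, hyO]
          · simp [List.mem_filter, hy]
        omega
      · rw [List.mem_filter]
        refine ⟨hcO, ?_⟩
        unfold pvRem
        simp [hcO, hcR]
    · intro hcB
      exact hA3 (pvLoopB O) hB1 hB2 (by simp) c hcB
  -- both sides are the same filter of O
  have hfinal : PySem.Set.diff O Rm = pvLoopB O := by
    have hBshape : pvLoopB O = O.filter (fun c => decide (c ∈ pvLoopB O)) := by
      rw [hB4, ← pvFilterSelfMem, ← hB4]
    rw [hBshape]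
    show O.filter (fun c => !(PySem.Set.contains Rm c)) = _
    apply List.filter_congr
    intro c hc
    by_cases hcR : c ∈ Rm
    · have h2 : c ∉ pvLoopB O := fun hb => ((hkey c hc).mpr hb) hcR
      simp [hcR, h2]
    · have h2 : c ∈ pvLoopB O := (hkey c hc).mp hcR
      simp [hcR, h2]
  exact hfinal
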